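-- pv_equiv track=rewrite | github.com/chenxy3791/leetcode | No2100-find-good-days-to-rob-the-bank-medium.py | goodDaysToRobBank
-- ===== SOURCE A (Python) =====
-- from typing import List
--
-- def goodDaysToRobBank(security: List[int], time: int) -> List[int]:
--     n = len(security)
--     left = [0] * n
--     right = [0] * n
--     for i in range(1, n):
--         if security[i] <= security[i - 1]:
--             left[i] = left[i - 1] + 1
--         if security[n - i - 1] <= security[n - i]:
--             right[n - i - 1] = right[n - i] + 1
--     return [i for i in range(time, n - time) if left[i] >= time and right[i] >= time]
-- ===== SOURCE B (Python) =====
-- from typing import List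
--
-- def goodDaysToRobBank(security: List[int], time: int) -> List[int]:
--     n = len(security)
--     # P[k] = number of indices j < k with j >= 1 and security[j] <= security[j-1]
--     # Q[k] = number of indices j < k with j+1 < n and security[j] <= security[j+1]
--     P = [0]
--     Q = [0]
--     for i in range(n):
--         P.append(P[-1] + (1 if i >= 1 and security[i] <= security[i - 1] else 0))
--         Q.append(Q[-1] + (1 if i + 1 < n and security[i] <= security[i + 1] else 0))
--     return [i for i in range(time, n - time)
--             if P[i + 1] - P[i - time + 1] == time and Q[i + time] - Q[i] == time]
-- ===== Notes on version B (the rewrite author's own statement) =====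
-- stated objective: alternative
-- what changed: Replaces A's run-length DP arrays (left/right longest non-increasing/non-decreasing runs compared against time) by prefix sums of 0/1 comparison indicators, selecting i when the window-sum of indicators over the time positions on each side equals time; no run lengths are maintained.
import Mathlib
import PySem

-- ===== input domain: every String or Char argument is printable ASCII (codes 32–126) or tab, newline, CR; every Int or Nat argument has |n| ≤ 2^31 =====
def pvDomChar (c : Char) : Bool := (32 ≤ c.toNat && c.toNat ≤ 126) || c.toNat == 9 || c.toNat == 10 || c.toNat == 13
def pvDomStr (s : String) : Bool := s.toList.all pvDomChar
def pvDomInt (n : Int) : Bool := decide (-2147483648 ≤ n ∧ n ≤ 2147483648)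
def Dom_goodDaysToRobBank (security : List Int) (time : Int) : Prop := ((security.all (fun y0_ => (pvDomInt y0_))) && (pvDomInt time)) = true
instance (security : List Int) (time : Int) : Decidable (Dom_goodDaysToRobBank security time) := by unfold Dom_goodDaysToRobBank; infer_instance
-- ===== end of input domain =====

-- B replaces A's run-length DP arrays by prefix sums of 0/1 comparison indicators and selects
-- the days whose window sums of indicators equal `time` (alternative algorithm, same cost).

-- ===== PORT A =====
-- literal transliteration of A; list indexing via pyGetD/pySetD is exact here because under
-- Pre_ (0 ≤ time) every index A uses is in range
def goodDaysToRobBank (security : List Int) (time : Int) : List Int :=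
  let n : Int := (security.length : Int)
  let st := (PySem.List.pyRange 1 n 1).foldl (fun (st : List Int × List Int) i =>
      let left := if PySem.List.pyGetD security i 0 ≤ PySem.List.pyGetD security (i - 1) 0
        then PySem.List.pySetD st.1 i (PySem.List.pyGetD st.1 (i - 1) 0 + 1) else st.1
      let right := if PySem.List.pyGetD security (n - i - 1) 0 ≤ PySem.List.pyGetD security (n - i) 0
        then PySem.List.pySetD st.2 (n - i - 1) (PySem.List.pyGetD st.2 (n - i) 0 + 1) else st.2
      (left, right))
    (List.replicate security.length 0, List.replicate security.length 0)
  (PySem.List.pyRange time (n - time) 1).filter (fun i =>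
    decide (time ≤ PySem.List.pyGetD st.1 i 0) && decide (time ≤ PySem.List.pyGetD st.2 i 0))

-- ===== PORT B =====
def goodDaysToRobBank_alt (security : List Int) (time : Int) : List Int :=
  let n : Int := (security.length : Int)
  let st := (PySem.List.pyRange 0 n 1).foldl (fun (st : List Int × List Int) i =>
      (st.1 ++ [PySem.List.pyGetD st.1 (-1) 0 +
          (if 1 ≤ i ∧ PySem.List.pyGetD security i 0 ≤ PySem.List.pyGetD security (i - 1) 0
            then 1 else 0)],
       st.2 ++ [PySem.List.pyGetD st.2 (-1) 0 +
          (if i + 1 < n ∧ PySem.List.pyGetD security i 0 ≤ PySem.List.pyGetD security (i + 1) 0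
            then 1 else 0)]))
    ([0], [0])
  (PySem.List.pyRange time (n - time) 1).filter (fun i =>
    decide (PySem.List.pyGetD st.1 (i + 1) 0 - PySem.List.pyGetD st.1 (i - time + 1) 0 = time) &&
    decide (PySem.List.pyGetD st.2 (i + time) 0 - PySem.List.pyGetD st.2 i 0 = time))

-- ===== PRECONDITION & SPEC =====
-- Pre_ excludes exactly time < 0, on which A always raises IndexError (its comprehension
-- reaches index n, and left[n] is out of range).
def Pre_goodDaysToRobBank (security : List Int) (time : Int) : Prop := 0 ≤ time
instance (security : List Int) (time : Int) : Decidable (Pre_goodDaysToRobBank security time) := by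
  unfold Pre_goodDaysToRobBank; infer_instance
def pvWitness_goodDaysToRobBank : List Int × Int := ([5, 3, 3, 3, 5, 6, 2], 2)
def Spec_goodDaysToRobBank (security : List Int) (time : Int) (out : List Int) : Prop := out = goodDaysToRobBank_alt security time
instance (security : List Int) (time : Int) (out : List Int) : Decidable (Spec_goodDaysToRobBank security time out) := by unfold Spec_goodDaysToRobBank; infer_instance

-- ===== CLAIM (what is proved, stated in full; the proofs are below) =====
def Claim_equal_goodDaysToRobBank : Prop := ∀ (security : List Int) (time : Int), Dom_goodDaysToRobBank security time → Pre_goodDaysToRobBank security time → Spec_goodDaysToRobBank security time (goodDaysToRobBank security time)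

-- ===== LEMMAS AND PROOFS =====

-- named loop bodies (definitionally equal to the ports' lambdas; used only by the proofs)
def stepL (security : List Int) (l : List Int) (i : Int) : List Int :=
  if PySem.List.pyGetD security i 0 ≤ PySem.List.pyGetD security (i - 1) 0
    then PySem.List.pySetD l i (PySem.List.pyGetD l (i - 1) 0 + 1) else l

def stepR (security : List Int) (n : Int) (r : List Int) (i : Int) : List Int :=
  if PySem.List.pyGetD security (n - i - 1) 0 ≤ PySem.List.pyGetD security (n - i) 0
    then PySem.List.pySetD r (n - i - 1) (PySem.List.pyGetD r (n - i) 0 + 1) else r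

def stepP (security : List Int) (P : List Int) (i : Int) : List Int :=
  P ++ [PySem.List.pyGetD P (-1) 0 +
    (if 1 ≤ i ∧ PySem.List.pyGetD security i 0 ≤ PySem.List.pyGetD security (i - 1) 0
      then 1 else 0)]

def stepQ (security : List Int) (n : Int) (Q : List Int) (i : Int) : List Int :=
  Q ++ [PySem.List.pyGetD Q (-1) 0 +
    (if i + 1 < n ∧ PySem.List.pyGetD security i 0 ≤ PySem.List.pyGetD security (i + 1) 0
      then 1 else 0)]

-- value of A's left[] at index i, and of A's right[] at distance k from the end
def Lv (security : List Int) : Nat → Int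
  | 0 => 0
  | i + 1 => if security.getD (i + 1) 0 ≤ security.getD i 0 then Lv security i + 1 else 0

def Rv (security : List Int) : Nat → Int
  | 0 => 0
  | k + 1 =>
    if security.getD (security.length - 2 - k) 0 ≤ security.getD (security.length - 1 - k) 0
      then Rv security k + 1 else 0

-- B's 0/1 indicators and prefix sums, in Nat-index form
def dPn (security : List Int) (k : Nat) : Int :=
  if 1 ≤ k ∧ security.getD k 0 ≤ security.getD (k - 1) 0 then 1 else 0

def dQn (security : List Int) (k : Nat) : Int :=
  if k + 1 < security.length ∧ security.getD k 0 ≤ security.getD (k + 1) 0 then 1 else 0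

def Pv (security : List Int) : Nat → Int
  | 0 => 0
  | k + 1 => Pv security k + dPn security k

def Qv (security : List Int) : Nat → Int
  | 0 => 0
  | k + 1 => Qv security k + dQn security k

def larr (security : List Int) : List Int :=
  (PySem.List.pyRange 1 (security.length : Int) 1).foldl (stepL security)
    (List.replicate security.length 0)

def rarr (security : List Int) : List Int :=
  (PySem.List.pyRange 1 (security.length : Int) 1).foldl (stepR security (security.length : Int))
    (List.replicate security.length 0)

lemma foldl_split (security : List Int) (n : Int) (l : List Int) :
    ∀ (i1 i2 : List Int),
    l.foldl (fun (st : List Int × List Int) i =>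
      (if PySem.List.pyGetD security i 0 ≤ PySem.List.pyGetD security (i - 1) 0
        then PySem.List.pySetD st.1 i (PySem.List.pyGetD st.1 (i - 1) 0 + 1) else st.1,
       if PySem.List.pyGetD security (n - i - 1) 0 ≤ PySem.List.pyGetD security (n - i) 0
        then PySem.List.pySetD st.2 (n - i - 1) (PySem.List.pyGetD st.2 (n - i) 0 + 1) else st.2)) (i1, i2)
      = (l.foldl (stepL security) i1, l.foldl (stepR security n) i2) := by
  induction l with
  | nil => intro i1 i2; rfl
  | cons a l ih => intro i1 i2; simpa [stepL, stepR] using ih _ _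

lemma A_eq_filter (security : List Int) (time : Int) :
    goodDaysToRobBank security time
      = (PySem.List.pyRange time ((security.length : Int) - time) 1).filter (fun i =>
          decide (time ≤ PySem.List.pyGetD (larr security) i 0) &&
          decide (time ≤ PySem.List.pyGetD (rarr security) i 0)) := by
  simp only [goodDaysToRobBank]
  rw [foldl_split]
  rfl

-- ---- characterization of A's left[] ----
lemma larr_partial (security : List Int) (m : Nat) (hm : m ≤ security.length - 1) :
    let r := (PySem.List.pyRange 1 (1 + (m : Int)) 1).foldl (stepL security)
      (List.replicate security.length 0)
    r.length = security.length ∧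
    (∀ k, k ≤ m → r.getD k 0 = Lv security k) ∧
    (∀ k, m < k → k ≤ security.length - 1 → r.getD k 0 = 0) := by
  intro r
  induction m with
  | zero =>
    have : r = List.replicate security.length 0 := by
      simp only [r, PySem.List.pyRange_one_eq_nil (by omega : (1:Int) + (0:Nat) ≤ 1), List.foldl_nil]
    rw [this]
    refine ⟨by simp, ?_, ?_⟩
    · intro k hk; interval_cases k
      show (List.replicate security.length (0:Int)).getD _ 0 = Lv security 0
      rw [show Lv security 0 = 0 from rfl]
      simp [List.getD, List.getElem?_replicate]
      split <;> simp
    · intro k _ _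
      simp [List.getD, List.getElem?_replicate]
      split <;> simp
  | succ m ih =>
    have hm' : m ≤ security.length - 1 := by omega
    have hlen : m + 2 ≤ security.length := by omega
    obtain ⟨ihl, ih2, ih3⟩ := ih hm'
    have hsplit : PySem.List.pyRange 1 (1 + ((m+1 : Nat) : Int)) 1
        = PySem.List.pyRange 1 (1 + (m : Int)) 1 ++ [1 + (m : Int)] := by
      have : (1 + ((m+1 : Nat) : Int)) = (1 + ((m : Nat) : Int)) + 1 := by push_cast; ring
      rw [this, PySem.List.pyRange_one_succ_right (by omega)]
    have hr : r = stepL security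
        ((PySem.List.pyRange 1 (1 + (m : Int)) 1).foldl (stepL security)
          (List.replicate security.length 0)) (1 + (m : Int)) := by
      simp only [r, hsplit, List.foldl_append, List.foldl_cons, List.foldl_nil]
    set r0 := (PySem.List.pyRange 1 (1 + (m : Int)) 1).foldl (stepL security)
      (List.replicate security.length 0) with hr0
    have ha : (1 : Int) + (m : Int) = ((m + 1 : Nat) : Int) := by push_cast; ring
    have hb : (1 : Int) + (m : Int) - 1 = ((m : Nat) : Int) := by push_cast; ring
    have hread : PySem.List.pyGetD r0 ((1 : Int) + (m : Int) - 1) 0 = Lv security m := by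
      rw [hb, PySem.List.pyGetD_natCast]
      exact ih2 m le_rfl
    have hLv : Lv security (m + 1) =
        if security.getD (m + 1) 0 ≤ security.getD m 0 then Lv security m + 1 else 0 := rfl
    rw [hr]
    unfold stepL
    rw [hread, hb, ha]
    simp only [PySem.List.pyGetD_natCast, PySem.List.pySetD_natCast]
    split
    · rename_i hcond
      refine ⟨by simpa using ihl, ?_, ?_⟩
      · intro k hk
        rcases Nat.eq_or_lt_of_le hk with hk1 | hk2
        · subst hk1
          have hlt : m + 1 < r0.length := by rw [ihl]; omega
          rw [List.getD, List.getElem?_set_self hlt]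
          rw [hLv, if_pos (by simpa using hcond)]
          rfl
        · have hk' : k ≤ m := by omega
          have hne : m + 1 ≠ k := by omega
          rw [List.getD, List.getElem?_set_ne hne, ← List.getD]
          exact ih2 k hk'
      · intro k hk1 hk2
        have hne : m + 1 ≠ k := by omega
        rw [List.getD, List.getElem?_set_ne hne, ← List.getD]
        exact ih3 k (by omega) hk2
    · rename_i hcond
      refine ⟨ihl, ?_, ?_⟩
      · intro k hk
        rcases Nat.eq_or_lt_of_le hk with hk1 | hk2
        · subst hk1
          rw [hLv, if_neg (by simpa using hcond)]
          exact ih3 (m+1) (by omega) (by omega)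
        · exact ih2 k (by omega)
      · intro k hk1 hk2
        exact ih3 k (by omega) hk2

lemma larr_getD (security : List Int) (i : Nat) (hi : i < security.length) :
    (larr security).getD i 0 = Lv security i := by
  have hcast : ((security.length : Nat) : Int) = 1 + ((security.length - 1 : Nat) : Int) := by
    omega
  obtain ⟨-, h2, -⟩ := larr_partial security (security.length - 1) le_rfl
  have := h2 i (by omega)
  unfold larr
  rw [hcast]
  exact this

-- ---- characterization of A's right[] ----
lemma rarr_partial (security : List Int) (m : Nat) (hm : m ≤ security.length - 1) :
    let r := (PySem.List.pyRange 1 (1 + (m : Int)) 1).foldl (stepR security (security.length : Int))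
      (List.replicate security.length 0)
    r.length = security.length ∧
    (∀ k, k ≤ m → r.getD (security.length - 1 - k) 0 = Rv security k) ∧
    (∀ k, m < k → k ≤ security.length - 1 → r.getD (security.length - 1 - k) 0 = 0) := by
  intro r
  induction m with
  | zero =>
    have : r = List.replicate security.length 0 := by
      simp only [r, PySem.List.pyRange_one_eq_nil (by omega : (1:Int) + (0:Nat) ≤ 1), List.foldl_nil]
    rw [this]
    refine ⟨by simp, ?_, ?_⟩
    · intro k hk; interval_cases k
      show (List.replicate security.length (0:Int)).getD _ 0 = Rv security 0
      rw [show Rv security 0 = 0 from rfl]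
      simp [List.getD, List.getElem?_replicate]
      split <;> simp
    · intro k _ _
      simp [List.getD, List.getElem?_replicate]
      split <;> simp
  | succ m ih =>
    have hm' : m ≤ security.length - 1 := by omega
    have hlen : m + 2 ≤ security.length := by omega
    obtain ⟨ihl, ih2, ih3⟩ := ih hm'
    have hsplit : PySem.List.pyRange 1 (1 + ((m+1 : Nat) : Int)) 1
        = PySem.List.pyRange 1 (1 + (m : Int)) 1 ++ [1 + (m : Int)] := by
      have : (1 + ((m+1 : Nat) : Int)) = (1 + ((m : Nat) : Int)) + 1 := by push_cast; ring
      rw [this, PySem.List.pyRange_one_succ_right (by omega)]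
    have hr : r = stepR security (security.length : Int)
        ((PySem.List.pyRange 1 (1 + (m : Int)) 1).foldl (stepR security (security.length : Int))
          (List.replicate security.length 0)) (1 + (m : Int)) := by
      simp only [r, hsplit, List.foldl_append, List.foldl_cons, List.foldl_nil]
    set r0 := (PySem.List.pyRange 1 (1 + (m : Int)) 1).foldl (stepR security (security.length : Int))
      (List.replicate security.length 0) with hr0
    have ha : (security.length : Int) - (1 + (m : Int)) - 1 = ((security.length - 2 - m : Nat) : Int) := by
      omega
    have hb : (security.length : Int) - (1 + (m : Int)) = ((security.length - 1 - m : Nat) : Int) := by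
      omega
    have hread : PySem.List.pyGetD r0 ((security.length : Int) - (1 + (m : Int))) 0 = Rv security m := by
      rw [hb, PySem.List.pyGetD_natCast]
      exact ih2 m le_rfl
    have hRv : Rv security (m + 1) =
        if security.getD (security.length - 2 - m) 0 ≤ security.getD (security.length - 1 - m) 0
          then Rv security m + 1 else 0 := rfl
    rw [hr]
    unfold stepR
    rw [ha, hb]
    simp only [PySem.List.pyGetD_natCast, PySem.List.pySetD_natCast]
    split
    · rename_i hcond
      refine ⟨by simpa using ihl, ?_, ?_⟩
      · intro k hk
        rcases Nat.eq_or_lt_of_le hk with hk1 | hk2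
        · subst hk1
          have hidx : security.length - 1 - (m+1) = security.length - 2 - m := by omega
          have hlt : security.length - 2 - m < r0.length := by rw [ihl]; omega
          rw [hidx, List.getD, List.getElem?_set_self hlt]
          rw [hRv, if_pos hcond, ← hread, hb, PySem.List.pyGetD_natCast]
          rfl
        · have hk' : k ≤ m := by omega
          have hne : security.length - 2 - m ≠ security.length - 1 - k := by omega
          rw [List.getD, List.getElem?_set_ne hne, ← List.getD]
          exact ih2 k hk'
      · intro k hk1 hk2
        have hne : security.length - 2 - m ≠ security.length - 1 - k := by omega
        rw [List.getD, List.getElem?_set_ne hne, ← List.getD]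
        exact ih3 k (by omega) hk2
    · rename_i hcond
      refine ⟨ihl, ?_, ?_⟩
      · intro k hk
        rcases Nat.eq_or_lt_of_le hk with hk1 | hk2
        · subst hk1
          rw [hRv, if_neg hcond]
          exact ih3 (m+1) (by omega) (by omega)
        · exact ih2 k (by omega)
      · intro k hk1 hk2
        exact ih3 k (by omega) hk2

lemma rarr_getD (security : List Int) (i : Nat) (hi : i < security.length) :
    (rarr security).getD i 0 = Rv security (security.length - 1 - i) := by
  have hcast : ((security.length : Nat) : Int) = 1 + ((security.length - 1 : Nat) : Int) := by
    omega
  obtain ⟨-, h2, -⟩ := rarr_partial security (security.length - 1) le_rfl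
  have := h2 (security.length - 1 - i) (by omega)
  rw [show security.length - 1 - (security.length - 1 - i) = i from by omega] at this
  unfold rarr
  rw [hcast] at this ⊢
  exact this

-- ---- characterization of B's prefix-sum lists ----
lemma dP_cast (security : List Int) (m : Nat) :
    (if 1 ≤ (m : Int) ∧
        PySem.List.pyGetD security (m : Int) 0 ≤ PySem.List.pyGetD security ((m : Int) - 1) 0
      then (1 : Int) else 0) = dPn security m := by
  cases m with
  | zero => simp [dPn]
  | succ m =>
    rw [show ((m + 1 : Nat) : Int) - 1 = ((m : Nat) : Int) from by push_cast; ring,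
        PySem.List.pyGetD_natCast, PySem.List.pyGetD_natCast]
    unfold dPn
    congr 1
    rw [eq_iff_iff]
    constructor
    · rintro ⟨-, h⟩; exact ⟨by omega, by simpa using h⟩
    · rintro ⟨-, h⟩; exact ⟨by omega, by simpa using h⟩

lemma dQ_cast (security : List Int) (m : Nat) :
    (if (m : Int) + 1 < (security.length : Int) ∧
        PySem.List.pyGetD security (m : Int) 0 ≤ PySem.List.pyGetD security ((m : Int) + 1) 0
      then (1 : Int) else 0) = dQn security m := by
  rw [show ((m : Nat) : Int) + 1 = ((m + 1 : Nat) : Int) from by push_cast; ring,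
      PySem.List.pyGetD_natCast, PySem.List.pyGetD_natCast]
  unfold dQn
  congr 1
  rw [eq_iff_iff]
  constructor
  · rintro ⟨h1, h⟩; exact ⟨by omega, h⟩
  · rintro ⟨h1, h⟩; exact ⟨by omega, h⟩

lemma Parr_eq (security : List Int) (m : Nat) :
    (PySem.List.pyRange 0 (m : Int) 1).foldl (stepP security) [0]
      = (List.range (m + 1)).map (Pv security) := by
  induction m with
  | zero =>
    rw [PySem.List.pyRange_one_eq_nil (by omega)]
    rfl
  | succ m ih =>
    have hc : ((m + 1 : Nat) : Int) = (m : Int) + 1 := by push_cast; ring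
    rw [hc, PySem.List.pyRange_one_succ_right (by omega), List.foldl_append,
        List.foldl_cons, List.foldl_nil, ih]
    have hlast : (List.range (m + 1)).map (Pv security)
        = (List.range m).map (Pv security) ++ [Pv security m] := by
      rw [List.range_succ, List.map_append]; rfl
    unfold stepP
    rw [hlast, PySem.List.pyGetD_neg_one_append_singleton, dP_cast]
    rw [List.range_succ (n := m + 1), List.map_append, hlast]
    simp [Pv]

lemma Qarr_eq (security : List Int) (m : Nat) :
    (PySem.List.pyRange 0 (m : Int) 1).foldl (stepQ security (security.length : Int)) [0]
      = (List.range (m + 1)).map (Qv security) := by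
  induction m with
  | zero =>
    rw [PySem.List.pyRange_one_eq_nil (by omega)]
    rfl
  | succ m ih =>
    have hc : ((m + 1 : Nat) : Int) = (m : Int) + 1 := by push_cast; ring
    rw [hc, PySem.List.pyRange_one_succ_right (by omega), List.foldl_append,
        List.foldl_cons, List.foldl_nil, ih]
    have hlast : (List.range (m + 1)).map (Qv security)
        = (List.range m).map (Qv security) ++ [Qv security m] := by
      rw [List.range_succ, List.map_append]; rfl
    unfold stepQ
    rw [hlast, PySem.List.pyGetD_neg_one_append_singleton, dQ_cast]
    rw [List.range_succ (n := m + 1), List.map_append, hlast]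
    simp [Qv]

lemma foldl_splitB (security : List Int) (n : Int) (l : List Int) :
    ∀ (p q : List Int),
    l.foldl (fun (st : List Int × List Int) i =>
      (st.1 ++ [PySem.List.pyGetD st.1 (-1) 0 +
          (if 1 ≤ i ∧ PySem.List.pyGetD security i 0 ≤ PySem.List.pyGetD security (i - 1) 0
            then 1 else 0)],
       st.2 ++ [PySem.List.pyGetD st.2 (-1) 0 +
          (if i + 1 < n ∧ PySem.List.pyGetD security i 0 ≤ PySem.List.pyGetD security (i + 1) 0
            then 1 else 0)])) (p, q)
      = (l.foldl (stepP security) p, l.foldl (stepQ security n) q) := by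
  induction l with
  | nil => intro p q; rfl
  | cons a l ih => intro p q; simpa [stepP, stepQ] using ih _ _

lemma B_eq_filter (security : List Int) (time : Int) :
    goodDaysToRobBank_alt security time
      = (PySem.List.pyRange time ((security.length : Int) - time) 1).filter (fun i =>
          decide (PySem.List.pyGetD ((List.range (security.length + 1)).map (Pv security)) (i + 1) 0
            - PySem.List.pyGetD ((List.range (security.length + 1)).map (Pv security)) (i - time + 1) 0 = time) &&
          decide (PySem.List.pyGetD ((List.range (security.length + 1)).map (Qv security)) (i + time) 0
            - PySem.List.pyGetD ((List.range (security.length + 1)).map (Qv security)) i 0 = time)) := by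
  simp only [goodDaysToRobBank_alt]
  rw [foldl_splitB]
  rw [Parr_eq, Qarr_eq]

lemma getPm (f : Nat → Int) (n : Nat) (j : Nat) (hj : j ≤ n) :
    PySem.List.pyGetD ((List.range (n + 1)).map f) ((j : Nat) : Int) 0 = f j := by
  rw [PySem.List.pyGetD_natCast, List.getD,
      List.getElem?_map, List.getElem?_range (by omega : j < n + 1)]
  rfl

-- ---- window/run equivalences ----
lemma Lv_nonneg (security : List Int) (i : Nat) : 0 ≤ Lv security i := by
  induction i with
  | zero => simp [Lv]
  | succ i ih => rw [Lv]; split <;> omega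

lemma Rv_nonneg (security : List Int) (k : Nat) : 0 ≤ Rv security k := by
  induction k with
  | zero => simp [Rv]
  | succ k ih => rw [Rv]; split <;> omega

lemma Lv_ge_iff (security : List Int) (t : Nat) :
    ∀ (i : Nat), t ≤ i →
      ((t : Int) ≤ Lv security i ↔
        ∀ k, k < t → security.getD (i - k) 0 ≤ security.getD (i - k - 1) 0) := by
  induction t with
  | zero =>
    intro i _
    simp [Lv_nonneg]
  | succ t ih =>
    intro i hi
    obtain ⟨m, rfl⟩ : ∃ m, i = m + 1 := ⟨i - 1, by omega⟩
    have hLv : Lv security (m + 1)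
        = if security.getD (m + 1) 0 ≤ security.getD m 0 then Lv security m + 1 else 0 := rfl
    constructor
    · intro h k hk
      rw [hLv] at h
      split at h
      · rename_i hc
        cases k with
        | zero => simpa using hc
        | succ k =>
          have := ((ih m (by omega)).1 (by push_cast at h ⊢; omega)) k (by omega)
          simpa using this
      · exfalso; push_cast at h; omega
    · intro h
      have hc : security.getD (m + 1) 0 ≤ security.getD m 0 := by simpa using h 0 (by omega)
      have hrest : (t : Int) ≤ Lv security m := by
        refine (ih m (by omega)).2 ?_
        intro k hk
        have := h (k + 1) (by omega)
        simpa using this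
      rw [hLv, if_pos hc]
      push_cast
      omega

lemma Rv_ge_iff (security : List Int) (t : Nat) :
    ∀ (i : Nat), i + t < security.length →
      ((t : Int) ≤ Rv security (security.length - 1 - i) ↔
        ∀ k, k < t → security.getD (i + k) 0 ≤ security.getD (i + k + 1) 0) := by
  induction t with
  | zero =>
    intro i _
    simp [Rv_nonneg]
  | succ t ih =>
    intro i hi
    have hm : security.length - 1 - i = (security.length - 1 - (i + 1)) + 1 := by omega
    have hRv : Rv security (security.length - 1 - i)
        = if security.getD i 0 ≤ security.getD (i + 1) 0
            then Rv security (security.length - 1 - (i + 1)) + 1 else 0 := by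
      rw [hm, Rv]
      have e1 : security.length - 2 - (security.length - 1 - (i + 1)) = i := by omega
      have e2 : security.length - 1 - (security.length - 1 - (i + 1)) = i + 1 := by omega
      rw [e1, e2]
    constructor
    · intro h k hk
      rw [hRv] at h
      split at h
      · rename_i hc
        cases k with
        | zero => simpa using hc
        | succ k =>
          have := ((ih (i + 1) (by omega)).1 (by push_cast at h ⊢; omega)) k (by omega)
          have e1 : i + (k + 1) = i + 1 + k := by omega
          rw [e1]; exact this
      · exfalso; push_cast at h; omega
    · intro h
      have hc : security.getD i 0 ≤ security.getD (i + 1) 0 := by simpa using h 0 (by omega)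
      have hrest : (t : Int) ≤ Rv security (security.length - 1 - (i + 1)) := by
        refine (ih (i + 1) (by omega)).2 ?_
        intro k hk
        have := h (k + 1) (by omega)
        have e1 : i + (k + 1) = i + 1 + k := by omega
        rw [e1] at this; exact this
      rw [hRv, if_pos hc]
      push_cast
      omega

lemma dPn_bounds (security : List Int) (k : Nat) : 0 ≤ dPn security k ∧ dPn security k ≤ 1 := by
  unfold dPn; split <;> omega

lemma dQn_bounds (security : List Int) (k : Nat) : 0 ≤ dQn security k ∧ dQn security k ≤ 1 := by
  unfold dQn; split <;> omega

lemma Pv_window_bounds (security : List Int) (t : Nat) :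
    ∀ (a : Nat), 0 ≤ Pv security (a + t) - Pv security a ∧
      Pv security (a + t) - Pv security a ≤ t := by
  induction t with
  | zero => intro a; simp
  | succ t ih =>
    intro a
    have h1 := ih a
    have h2 := dPn_bounds security (a + t)
    have : Pv security (a + (t + 1)) = Pv security (a + t) + dPn security (a + t) := rfl
    rw [this]
    push_cast
    omega

lemma Qv_window_bounds (security : List Int) (t : Nat) :
    ∀ (a : Nat), 0 ≤ Qv security (a + t) - Qv security a ∧
      Qv security (a + t) - Qv security a ≤ t := by
  induction t with
  | zero => intro a; simp
  | succ t ih =>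
    intro a
    have h1 := ih a
    have h2 := dQn_bounds security (a + t)
    have : Qv security (a + (t + 1)) = Qv security (a + t) + dQn security (a + t) := rfl
    rw [this]
    push_cast
    omega

lemma Pwin_iff (security : List Int) (t : Nat) :
    ∀ (i : Nat), t ≤ i →
      (Pv security (i + 1) - Pv security (i + 1 - t) = (t : Int) ↔
        ∀ k, k < t → security.getD (i - k) 0 ≤ security.getD (i - k - 1) 0) := by
  induction t with
  | zero => intro i _; simp
  | succ t ih =>
    intro i hi
    have e0 : i + 1 - (t + 1) = i - t := by omega
    have e1 : i + 1 - t = (i - t) + 1 := by omega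
    have hP : Pv security ((i - t) + 1) = Pv security (i - t) + dPn security (i - t) := rfl
    have h1t : 1 ≤ i - t := by omega
    have hd : dPn security (i - t)
        = if security.getD (i - t) 0 ≤ security.getD (i - t - 1) 0 then 1 else 0 := by
      simp [dPn, h1t]
    have hwb := Pv_window_bounds security t ((i - t) + 1)
    rw [show (i - t) + 1 + t = i + 1 from by omega] at hwb
    have hih := ih i (by omega)
    rw [e1] at hih
    have hdb := dPn_bounds security (i - t)
    constructor
    · intro h
      rw [e0] at h
      have hwin : Pv security (i + 1) - Pv security ((i - t) + 1) = (t : Int) := by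
        push_cast at h ⊢; omega
      have hd1 : dPn security (i - t) = 1 := by
        push_cast at h; omega
      intro k hk
      rcases Nat.lt_succ_iff_lt_or_eq.1 hk with hk' | rfl
      · exact (hih.1 hwin) k hk'
      · rw [hd] at hd1
        by_contra hc
        rw [if_neg hc] at hd1
        omega
    · intro h
      have hwin : Pv security (i + 1) - Pv security ((i - t) + 1) = (t : Int) :=
        hih.2 (fun k hk => h k (by omega))
      have hd1 : dPn security (i - t) = 1 := by
        rw [hd, if_pos (h t (by omega))]
      rw [e0]
      push_cast at hwin ⊢
      omega

lemma Qwin_iff (security : List Int) (t : Nat) :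
    ∀ (i : Nat), i + t < security.length →
      (Qv security (i + t) - Qv security i = (t : Int) ↔
        ∀ k, k < t → security.getD (i + k) 0 ≤ security.getD (i + k + 1) 0) := by
  induction t with
  | zero => intro i _; simp
  | succ t ih =>
    intro i hi
    have hQ : Qv security (i + (t + 1)) = Qv security (i + t) + dQn security (i + t) := rfl
    have h1t : i + t + 1 < security.length := by omega
    have hd : dQn security (i + t)
        = if security.getD (i + t) 0 ≤ security.getD (i + t + 1) 0 then 1 else 0 := by
      simp [dQn, h1t]
    have hwb := Qv_window_bounds security t i
    have hdb := dQn_bounds security (i + t)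
    have hih := ih i (by omega)
    constructor
    · intro h
      rw [hQ] at h
      have hwin : Qv security (i + t) - Qv security i = (t : Int) := by
        push_cast at h ⊢; omega
      have hd1 : dQn security (i + t) = 1 := by
        push_cast at h; omega
      intro k hk
      rcases Nat.lt_succ_iff_lt_or_eq.1 hk with hk' | rfl
      · exact (hih.1 hwin) k hk'
      · rw [hd] at hd1
        by_contra hc
        rw [if_neg hc] at hd1
        omega
    · intro h
      have hwin : Qv security (i + t) - Qv security i = (t : Int) :=
        hih.2 (fun k hk => h k (by omega))
      have hd1 : dQn security (i + t) = 1 := by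
        rw [hd, if_pos (h t (by omega))]
      rw [hQ]
      push_cast at hwin ⊢
      omega

theorem goodDaysToRobBank_spec : Claim_equal_goodDaysToRobBank := by
  intro security time _ ht
  unfold Spec_goodDaysToRobBank
  rw [A_eq_filter, B_eq_filter]
  apply List.filter_congr
  intro i hi
  rw [PySem.List.mem_pyRange_one] at hi
  obtain ⟨hi1, hi2⟩ := hi
  set t := time.toNat with htdef
  have htc : time = (t : Int) := (Int.toNat_of_nonneg ht).symm
  set iN := i.toNat with hiNdef
  have hic : i = (iN : Int) := (Int.toNat_of_nonneg (by omega)).symm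
  have hti : t ≤ iN := by omega
  have hlt : iN + t < security.length := by omega
  have hiL : iN < security.length := by omega
  -- left side
  have hA1 : PySem.List.pyGetD (larr security) i 0 = Lv security iN := by
    rw [hic, PySem.List.pyGetD_natCast, larr_getD security iN hiL]
  have hA2 : PySem.List.pyGetD (rarr security) i 0
      = Rv security (security.length - 1 - iN) := by
    rw [hic, PySem.List.pyGetD_natCast, rarr_getD security iN hiL]
  have hB1a : i + 1 = ((iN + 1 : Nat) : Int) := by omega
  have hB1b : i - time + 1 = ((iN + 1 - t : Nat) : Int) := by omega
  have hB2a : i + time = ((iN + t : Nat) : Int) := by omega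
  have e1 : (time ≤ PySem.List.pyGetD (larr security) i 0)
      ↔ (PySem.List.pyGetD ((List.range (security.length + 1)).map (Pv security)) (i + 1) 0
          - PySem.List.pyGetD ((List.range (security.length + 1)).map (Pv security)) (i - time + 1) 0
          = time) := by
    rw [hA1, hB1a, hB1b, getPm _ _ _ (by omega), getPm _ _ _ (by omega), htc]
    rw [Lv_ge_iff security t iN hti]
    rw [Pwin_iff security t iN hti]
  have e2 : (time ≤ PySem.List.pyGetD (rarr security) i 0)
      ↔ (PySem.List.pyGetD ((List.range (security.length + 1)).map (Qv security)) (i + time) 0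
          - PySem.List.pyGetD ((List.range (security.length + 1)).map (Qv security)) i 0
          = time) := by
    rw [hA2, hB2a, hic, getPm _ _ _ (by omega), getPm _ _ _ (by omega), htc]
    rw [Rv_ge_iff security t iN hlt]
    rw [Qwin_iff security t iN hlt]
  rw [decide_eq_decide.2 e1, decide_eq_decide.2 e2]

-- ===== VERDICT (by name: the statement is the Claim_ definition above) =====
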